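-- pv_equiv track=rewrite | github.com/dudtj5307/Coding_skills | 프로그래머스/2/12924. 숫자의 표현/숫자의 표현.py | solution
-- ===== SOURCE A (Python) =====
-- def solution(n):
--     answer = 0
--     for i in range(1, n+1):
--         if (n - i*(i-1)//2) % i == 0:
--             if i*(i-1)//2 >= n:
--                 break
--             answer += 1
--     return answer
-- ===== SOURCE B (Python) =====
-- def solution(n):
--     if n <= 0:
--         return 0
--     m = n
--     while m % 2 == 0:
--         m //= 2
--     count = 0
--     d = 1
--     while d * d <= m:
--         if m % d == 0:
--             count += 1 if d * d == m else 2
--         d += 1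
--     return count
-- ===== Notes on version B (the rewrite author's own statement) =====
-- stated objective: faster
-- what changed: B replaces A's scan over run lengths with the number-theoretic identity 'ways = number of odd divisors of n': it repeatedly halves n down to its odd part m and then counts the divisors of m in pairs with a d*d <= m loop.
import Mathlib
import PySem

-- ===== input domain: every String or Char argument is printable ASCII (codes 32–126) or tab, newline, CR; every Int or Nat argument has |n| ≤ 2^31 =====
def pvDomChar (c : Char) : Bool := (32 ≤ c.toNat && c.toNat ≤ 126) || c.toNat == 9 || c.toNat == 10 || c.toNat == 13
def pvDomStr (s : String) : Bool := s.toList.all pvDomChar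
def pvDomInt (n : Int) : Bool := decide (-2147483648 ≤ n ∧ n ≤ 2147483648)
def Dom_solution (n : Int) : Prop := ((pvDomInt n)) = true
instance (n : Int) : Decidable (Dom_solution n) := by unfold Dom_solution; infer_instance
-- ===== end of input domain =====

-- B replaces A's scan over run lengths by counting the odd divisors of n
-- (odd part + paired divisor search up to sqrt): a different algorithm, measured faster.

-- ===== PORT A =====
-- the for-loop of A: 'break' is modelled by returning the accumulator
def solutionLoop (n : Int) : List Int → Int → Int
  | [], answer => answer
  | i :: rest, answer =>
    if PySem.Int.mod (n - PySem.Int.floordiv (i * (i - 1)) 2) i == 0 then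
      if PySem.Int.floordiv (i * (i - 1)) 2 ≥ n then answer
      else solutionLoop n rest (answer + 1)
    else solutionLoop n rest answer

def solution (n : Int) : Int := solutionLoop n (PySem.List.pyRange 1 (n + 1) 1) 0

-- ===== PORT B =====
-- termination helper for the odd-part while loop (cited by decreasing_by)
theorem oddPartLoop_dec (m : Int) (h : 0 < m ∧ PySem.Int.mod m 2 = 0) :
    (PySem.Int.floordiv m 2).toNat < m.toNat := by
  obtain ⟨hm, he⟩ := h
  obtain ⟨k, hk⟩ := (PySem.Int.mod_eq_zero_iff_dvd m 2).mp he
  subst hk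
  rw [PySem.Int.floordiv, Int.mul_fdiv_cancel_left k (by norm_num)]
  omega

-- Python: 'while m % 2 == 0: m //= 2'; the conjunct 0 < m is a pure totality
-- guard (the call site only passes m ≥ 1, where the loop behaves identically).
def oddPartLoop (m : Int) : Int :=
  if h : 0 < m ∧ PySem.Int.mod m 2 = 0 then oddPartLoop (PySem.Int.floordiv m 2) else m
termination_by m.toNat
decreasing_by exact oddPartLoop_dec m h

-- termination helper for the sqrt divisor loop (cited by decreasing_by)
theorem sqrtCountLoop_dec (m d : Int) (h : d * d ≤ m) :
    (m + 1 - (d + 1)).toNat < (m + 1 - d).toNat := by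
  have hdm : d ≤ m := by
    by_cases hd : d ≤ 0
    · nlinarith [mul_self_nonneg d]
    · nlinarith
  omega

-- Python: 'while d*d <= m: if m % d == 0: count += 1 if d*d == m else 2; d += 1'
def sqrtCountLoop (m d count : Int) : Int :=
  if h : d * d ≤ m then
    sqrtCountLoop m (d + 1)
      (if PySem.Int.mod m d == 0 then count + (if d * d = m then 1 else 2) else count)
  else count
termination_by (m + 1 - d).toNat
decreasing_by exact sqrtCountLoop_dec m d h

def solution_alt (n : Int) : Int :=
  if n ≤ 0 then 0 else sqrtCountLoop (oddPartLoop n) 1 0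

-- ===== PRECONDITION & SPEC =====
def Spec_solution (n : Int) (out : Int) : Prop := out = solution_alt n
instance (n : Int) (out : Int) : Decidable (Spec_solution n out) := by unfold Spec_solution; infer_instance

-- ===== CLAIM (what is proved, stated in full; the proofs are below) =====
def Claim_equal_solution : Prop := ∀ (n : Int), Dom_solution n → Spec_solution n (solution n)

-- ===== LEMMAS AND PROOFS =====

-- abbreviation for the triangular term i*(i-1)//2
def tri (i : Int) : Int := PySem.Int.floordiv (i * (i - 1)) 2

-- T i := i*(i-1)//2 is an exact halving: 2 * tri i = i * (i - 1)
theorem two_mul_tri (i : Int) : 2 * tri i = i * (i - 1) := by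
  obtain ⟨k, hk⟩ := Int.even_mul_succ_self (i - 1)
  have h : i * (i - 1) = 2 * k := by ring_nf; ring_nf at hk; omega
  rw [tri, h, PySem.Int.floordiv, Int.mul_fdiv_cancel_left k (by norm_num)]

theorem tri_nonneg (i : Int) : 0 ≤ tri i := by
  have h := two_mul_tri i
  nlinarith [sq_nonneg (2 * i - 1)]

-- a computable integer interval (Finset.Icc on Int is noncomputable in this build)
def iccInt (a b : Int) : Finset Int :=
  (Finset.range (b + 1 - a).toNat).image (fun k : Nat => a + (k : Int))

theorem mem_iccInt (a b x : Int) : x ∈ iccInt a b ↔ a ≤ x ∧ x ≤ b := by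
  unfold iccInt
  simp only [Finset.mem_image, Finset.mem_range]
  constructor
  · rintro ⟨k, hk, rfl⟩; omega
  · rintro ⟨h1, h2⟩; exact ⟨(x - a).toNat, by omega, by omega⟩

-- the set A's loop counts, and the odd-divisor set B counts
def setA (n : Int) : Finset Int :=
  Finset.filter
    (fun i => tri i + i ≤ n ∧ PySem.Int.mod (n - tri i) i = 0)
    (iccInt 1 n)

def oddDivSet (n : Int) : Finset Int :=
  Finset.filter (fun d => PySem.Int.mod n d = 0 ∧ PySem.Int.mod d 2 ≠ 0) (iccInt 1 n)

def divSet (m : Int) : Finset Int :=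
  Finset.filter (fun d => PySem.Int.mod m d = 0) (iccInt 1 m)

theorem mem_setA (n i : Int) : i ∈ setA n ↔
    (1 ≤ i ∧ i ≤ n) ∧ tri i + i ≤ n ∧ PySem.Int.mod (n - tri i) i = 0 := by
  unfold setA
  rw [Finset.mem_filter, mem_iccInt]

theorem mem_oddDivSet (n d : Int) : d ∈ oddDivSet n ↔
    (1 ≤ d ∧ d ≤ n) ∧ PySem.Int.mod n d = 0 ∧ PySem.Int.mod d 2 ≠ 0 := by
  unfold oddDivSet
  rw [Finset.mem_filter, mem_iccInt]

theorem mem_divSet (m d : Int) : d ∈ divSet m ↔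
    (1 ≤ d ∧ d ≤ m) ∧ PySem.Int.mod m d = 0 := by
  unfold divSet
  rw [Finset.mem_filter, mem_iccInt]

-- counting tails: dropping the current index
theorem filter_ge_card_step (s : Finset Int) (i : Int) (hi : i ∈ s) :
    (s.filter (fun e => i ≤ e)).card = 1 + (s.filter (fun e => i + 1 ≤ e)).card := by
  have hset : s.filter (fun e => i ≤ e) = insert i (s.filter (fun e => i + 1 ≤ e)) := by
    ext e
    simp only [Finset.mem_filter, Finset.mem_insert]
    constructor
    · rintro ⟨he, hle⟩
      by_cases h : e = i
      · exact Or.inl h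
      · exact Or.inr ⟨he, by omega⟩
    · rintro (rfl | ⟨he, h⟩)
      · exact ⟨hi, le_refl _⟩
      · exact ⟨he, by omega⟩
  rw [hset, Finset.card_insert_of_notMem (by simp)]
  omega

theorem filter_ge_card_skip (s : Finset Int) (i : Int) (hi : i ∉ s) :
    s.filter (fun e => i ≤ e) = s.filter (fun e => i + 1 ≤ e) := by
  ext e
  simp only [Finset.mem_filter]
  constructor
  · rintro ⟨he, hle⟩
    have : e ≠ i := fun h => hi (h ▸ he)
    exact ⟨he, by omega⟩
  · rintro ⟨he, hle⟩
    exact ⟨he, by omega⟩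

-- A's loop counts the elements of setA not yet passed
theorem solutionLoop_card (n : Int) : ∀ (fuel : Nat) (i answer : Int), 1 ≤ i →
    (n + 1 - i).toNat ≤ fuel →
    solutionLoop n (PySem.List.pyRange i (n + 1) 1) answer =
      answer + (((setA n).filter (fun e => i ≤ e)).card : Int) := by
  intro fuel
  induction fuel with
  | zero =>
    intro i answer h1 hf
    rw [PySem.List.pyRange_one_eq_nil (by omega)]
    have hemp : (setA n).filter (fun e => i ≤ e) = ∅ := by
      rw [Finset.filter_eq_empty_iff]
      intro e he
      rw [mem_setA] at he
      omega
    rw [hemp]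
    simp [solutionLoop]
  | succ k ih =>
    intro i answer h1 hf
    by_cases hni : n + 1 ≤ i
    · rw [PySem.List.pyRange_one_eq_nil (by omega)]
      have hemp : (setA n).filter (fun e => i ≤ e) = ∅ := by
        rw [Finset.filter_eq_empty_iff]
        intro e he
        rw [mem_setA] at he
        omega
      rw [hemp]
      simp [solutionLoop]
    · rw [PySem.List.pyRange_one_cons (by omega)]
      simp only [solutionLoop, beq_iff_eq]
      by_cases hm : PySem.Int.mod (n - PySem.Int.floordiv (i * (i - 1)) 2) i = 0
      · rw [if_pos hm]
        by_cases hge : PySem.Int.floordiv (i * (i - 1)) 2 ≥ n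
        · rw [if_pos hge]
          have hemp : (setA n).filter (fun e => i ≤ e) = ∅ := by
            rw [Finset.filter_eq_empty_iff]
            intro e he hle
            rw [mem_setA] at he
            obtain ⟨⟨he1, hen⟩, hte, _⟩ := he
            have h2e := two_mul_tri e
            have h2i := two_mul_tri i
            have hge' : tri i ≥ n := hge
            nlinarith
          rw [hemp]
          simp
        · rw [if_neg hge]
          rw [ih (i + 1) (answer + 1) (by omega) (by omega)]
          have hiA : i ∈ setA n := by
            rw [mem_setA]
            have hdvd := (PySem.Int.mod_eq_zero_iff_dvd _ _).mp hm
            have hlt : tri i < n := lt_of_not_ge hge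
            have hge' : i ≤ n - tri i := Int.le_of_dvd (by omega) hdvd
            have htn := tri_nonneg i
            exact ⟨⟨h1, by omega⟩, by omega, hm⟩
          rw [filter_ge_card_step _ i hiA]
          push_cast
          ring
      · rw [if_neg hm]
        rw [ih (i + 1) answer (by omega) (by omega)]
        have hiN : i ∉ setA n := by
          rw [mem_setA]
          rintro ⟨_, _, hc⟩
          exact hm hc
        rw [filter_ge_card_skip _ i hiN]
  
-- helper: exact division by a nonzero factor
theorem ediv_exact (a b c : Int) (ha : a ≠ 0) (h : a * b = c) : c / a = b := by
  rw [← h, Int.mul_ediv_cancel_left _ ha]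

-- an odd number dividing 2k divides k
theorem odd_dvd_half (d k : Int) (hd : ¬ (2 : Int) ∣ d) (h : d ∣ 2 * k) : d ∣ k := by
  obtain ⟨m, hm⟩ := h
  have hev : Even (d * m) := by rw [← hm]; exact ⟨k, by ring⟩
  rcases Int.even_mul.mp hev with h1 | h2
  · exact absurd h1.two_dvd hd
  · obtain ⟨m', hm'⟩ := h2
    refine ⟨m', ?_⟩
    have h2k : 2 * k = 2 * (d * m') := by rw [hm, hm']; ring
    exact mul_left_cancel₀ two_ne_zero h2k

-- extraction: a member i of setA n gives the factorisation i * (i + 2a - 1) = 2n, a ≥ 1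
theorem setA_factor (n i : Int) (h : i ∈ setA n) :
    ∃ a : Int, 1 ≤ a ∧ i * (i + 2 * a - 1) = 2 * n := by
  rw [mem_setA] at h
  obtain ⟨⟨h1, hn⟩, ht, hm⟩ := h
  obtain ⟨a, ha⟩ := (PySem.Int.mod_eq_zero_iff_dvd _ _).mp hm
  refine ⟨a, ?_, ?_⟩
  · by_contra hc
    push_neg at hc
    have : i * a ≤ 0 := by nlinarith
    omega
  · have h2 := two_mul_tri i
    linear_combination (-2) * ha - h2

-- the bijection: setA n ↔ odd divisors of n (i ↦ the odd element of {i, 2n/i})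
theorem card_setA_eq_oddDivSet (n : Int) (hn : 1 ≤ n) :
    (setA n).card = (oddDivSet n).card := by
  refine Finset.card_bij' (fun i _ => if i % 2 = 0 then 2 * n / i else i)
    (fun d _ => min d (2 * n / d)) ?_ ?_ ?_ ?_
  · -- maps into oddDivSet
    intro i hi
    show (if i % 2 = 0 then 2 * n / i else i) ∈ oddDivSet n
    obtain ⟨a, ha1, hprod⟩ := setA_factor n i hi
    rw [mem_setA] at hi
    obtain ⟨⟨h1, hin⟩, _, _⟩ := hi
    by_cases hpar : i % 2 = 0
    · rw [if_pos hpar]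
      have hdiv : 2 * n / i = i + 2 * a - 1 :=
        ediv_exact i (i + 2 * a - 1) (2 * n) (by omega) hprod
      rw [hdiv, mem_oddDivSet]
      have hjodd : ¬ (2 : Int) ∣ (i + 2 * a - 1) := by omega
      have hi2 : (2 : Int) ≤ i := by omega
      refine ⟨⟨by omega, by nlinarith [hprod]⟩, ?_, ?_⟩
      · rw [PySem.Int.mod_eq_zero_iff_dvd]
        exact odd_dvd_half _ n hjodd ⟨i, by linarith [hprod]⟩
      · rw [Ne, PySem.Int.mod_eq_zero_iff_dvd]
        omega
    · rw [if_neg hpar, mem_oddDivSet]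
      have hiodd : ¬ (2 : Int) ∣ i := by omega
      refine ⟨⟨h1, hin⟩, ?_, ?_⟩
      · rw [PySem.Int.mod_eq_zero_iff_dvd]
        exact odd_dvd_half _ n hiodd ⟨i + 2 * a - 1, by linarith [hprod]⟩
      · rw [Ne, PySem.Int.mod_eq_zero_iff_dvd]
        omega
  · -- maps into setA
    intro d hd
    show min d (2 * n / d) ∈ setA n
    rw [mem_oddDivSet] at hd
    obtain ⟨⟨hd1, hdn⟩, hdvd, hodd⟩ := hd
    obtain ⟨q, hq⟩ := (PySem.Int.mod_eq_zero_iff_dvd n d).mp hdvd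
    rw [Ne, PySem.Int.mod_eq_zero_iff_dvd] at hodd
    have hq1 : 1 ≤ q := by nlinarith
    obtain ⟨s, hs⟩ : ∃ s : Int, d = 2 * s + 1 := ⟨(d - 1) / 2, by omega⟩
    have he : 2 * n / d = 2 * q :=
      ediv_exact d (2 * q) (2 * n) (by omega) (by rw [hq]; ring)
    rw [he]
    rcases lt_trichotomy d (2 * q) with hlt | heq | hgt
    · rw [min_eq_left (le_of_lt hlt), mem_setA]
      have h2 := two_mul_tri d
      refine ⟨⟨hd1, hdn⟩, by nlinarith, ?_⟩
      rw [PySem.Int.mod_eq_zero_iff_dvd]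
      refine ⟨q - s, ?_⟩
      have key : 2 * (n - tri d) = 2 * (d * (q - s)) := by
        linear_combination 2 * hq - h2 - d * hs
      exact mul_left_cancel₀ two_ne_zero key
    · exact absurd (heq ▸ ⟨q, rfl⟩ : (2 : Int) ∣ d) hodd
    · rw [min_eq_right (by omega), mem_setA]
      have h2 := two_mul_tri (2 * q)
      refine ⟨⟨by omega, by nlinarith⟩, by nlinarith, ?_⟩
      rw [PySem.Int.mod_eq_zero_iff_dvd]
      refine ⟨s - q + 1, ?_⟩
      have key : 2 * (n - tri (2 * q)) = 2 * (2 * q * (s - q + 1)) := by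
        linear_combination 2 * hq - h2 + 2 * q * hs
      exact mul_left_cancel₀ two_ne_zero key
  · -- left inverse
    intro i hi
    show min (if i % 2 = 0 then 2 * n / i else i)
      (2 * n / (if i % 2 = 0 then 2 * n / i else i)) = i
    obtain ⟨a, ha1, hprod⟩ := setA_factor n i hi
    rw [mem_setA] at hi
    obtain ⟨⟨h1, hin⟩, _, _⟩ := hi
    by_cases hpar : i % 2 = 0
    · simp only [if_pos hpar]
      have hdiv : 2 * n / i = i + 2 * a - 1 :=
        ediv_exact i (i + 2 * a - 1) (2 * n) (by omega) hprod
      rw [hdiv]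
      have hdiv2 : 2 * n / (i + 2 * a - 1) = i :=
        ediv_exact (i + 2 * a - 1) i (2 * n) (by omega) (by linarith [hprod])
      rw [hdiv2]
      exact min_eq_right (by omega)
    · simp only [if_neg hpar]
      have hdiv : 2 * n / i = i + 2 * a - 1 :=
        ediv_exact i (i + 2 * a - 1) (2 * n) (by omega) hprod
      rw [hdiv]
      exact min_eq_left (by omega)
  · -- right inverse
    intro d hd
    show (if (min d (2 * n / d)) % 2 = 0 then 2 * n / (min d (2 * n / d))
      else min d (2 * n / d)) = d
    rw [mem_oddDivSet] at hd
    obtain ⟨⟨hd1, hdn⟩, hdvd, hodd⟩ := hd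
    obtain ⟨q, hq⟩ := (PySem.Int.mod_eq_zero_iff_dvd n d).mp hdvd
    rw [Ne, PySem.Int.mod_eq_zero_iff_dvd] at hodd
    have hq1 : 1 ≤ q := by nlinarith
    have he : 2 * n / d = 2 * q :=
      ediv_exact d (2 * q) (2 * n) (by omega) (by rw [hq]; ring)
    rw [he]
    rcases lt_trichotomy d (2 * q) with hlt | heq | hgt
    · rw [min_eq_left (le_of_lt hlt)]
      rw [if_neg (by omega)]
    · exact absurd (heq ▸ ⟨q, rfl⟩ : (2 : Int) ∣ d) hodd
    · rw [min_eq_right (by omega)]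
      rw [if_pos (by omega)]
      exact ediv_exact (2 * q) d (2 * n) (by omega) (by rw [hq]; ring)

-- stripping 2s preserves the odd-divisor set and yields an odd positive number
theorem oddPartLoop_spec : ∀ (fuel : Nat) (n : Int), n.toNat ≤ fuel → 1 ≤ n →
    1 ≤ oddPartLoop n ∧ ¬ (2 : Int) ∣ oddPartLoop n ∧
      oddDivSet n = oddDivSet (oddPartLoop n) := by
  intro fuel
  induction fuel with
  | zero => intro n hf h1; omega
  | succ k ih =>
    intro n hf h1
    rw [oddPartLoop]
    by_cases h : 0 < n ∧ PySem.Int.mod n 2 = 0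
    · rw [dif_pos h]
      obtain ⟨hpos, heven⟩ := h
      obtain ⟨m, hm⟩ := (PySem.Int.mod_eq_zero_iff_dvd n 2).mp heven
      have hfd : PySem.Int.floordiv n 2 = m := by
        rw [hm, PySem.Int.floordiv, Int.mul_fdiv_cancel_left m (by norm_num)]
      rw [hfd]
      have hm1 : 1 ≤ m := by omega
      obtain ⟨ih1, ih2, ih3⟩ := ih m (by omega) hm1
      refine ⟨ih1, ih2, ?_⟩
      rw [← ih3]
      ext d
      rw [mem_oddDivSet, mem_oddDivSet]
      constructor
      · rintro ⟨⟨hd1, hdn⟩, hdvd, hodd⟩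
        rw [PySem.Int.mod_eq_zero_iff_dvd] at hdvd
        rw [Ne, PySem.Int.mod_eq_zero_iff_dvd] at hodd
        have hdm : d ∣ m := odd_dvd_half d m hodd (by rw [← hm]; exact hdvd)
        refine ⟨⟨hd1, Int.le_of_dvd (by omega) hdm⟩, ?_, ?_⟩
        · rw [PySem.Int.mod_eq_zero_iff_dvd]; exact hdm
        · rw [Ne, PySem.Int.mod_eq_zero_iff_dvd]; exact hodd
      · rintro ⟨⟨hd1, hdm⟩, hdvd, hodd⟩
        rw [PySem.Int.mod_eq_zero_iff_dvd] at hdvd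
        refine ⟨⟨hd1, by omega⟩, ?_, hodd⟩
        rw [PySem.Int.mod_eq_zero_iff_dvd]
        exact Dvd.dvd.trans hdvd ⟨2, by omega⟩
    · rw [dif_neg h]
      have hodd : PySem.Int.mod n 2 ≠ 0 := by
        intro hc
        exact h ⟨by omega, hc⟩
      refine ⟨h1, ?_, rfl⟩
      rw [← PySem.Int.mod_eq_zero_iff_dvd] at *
      exact hodd

-- for odd m, every divisor in [1,m] is odd
theorem oddDivSet_eq_divSet (m : Int) (hm : ¬ (2 : Int) ∣ m) :
    oddDivSet m = divSet m := by
  ext d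
  rw [mem_oddDivSet, mem_divSet]
  constructor
  · rintro ⟨hb, hdvd, _⟩
    exact ⟨hb, hdvd⟩
  · rintro ⟨hb, hdvd⟩
    refine ⟨hb, hdvd, ?_⟩
    rw [Ne, PySem.Int.mod_eq_zero_iff_dvd]
    intro h2
    rw [PySem.Int.mod_eq_zero_iff_dvd] at hdvd
    exact hm (h2.trans hdvd)

-- the set still to be counted by the sqrt loop from d on
def remSet (m d : Int) : Finset Int :=
  Finset.filter (fun e => PySem.Int.mod m e = 0 ∧ d ≤ e ∧ d * e ≤ m) (iccInt 1 m)

theorem mem_remSet (m d e : Int) : e ∈ remSet m d ↔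
    (1 ≤ e ∧ e ≤ m) ∧ PySem.Int.mod m e = 0 ∧ d ≤ e ∧ d * e ≤ m := by
  unfold remSet
  rw [Finset.mem_filter, mem_iccInt]

theorem sqrtCountLoop_card (m : Int) (hm : 1 ≤ m) :
    ∀ (fuel : Nat) (d count : Int), 1 ≤ d → (m + 1 - d).toNat ≤ fuel →
    sqrtCountLoop m d count = count + ((remSet m d).card : Int) := by
  intro fuel
  induction fuel with
  | zero =>
    intro d count hd hf
    -- fuel 0 means d > m, so d*d > m, loop stops and remSet is empty
    have hdm : m + 1 ≤ d := by omega
    rw [sqrtCountLoop, dif_neg (by nlinarith)]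
    have hemp : remSet m d = ∅ := by
      ext e
      rw [mem_remSet]
      simp only [Finset.notMem_empty, iff_false]
      rintro ⟨⟨he1, hem⟩, _, hde, hprod⟩
      nlinarith
    rw [hemp]
    simp
  | succ k ih =>
    intro d count hd hf
    rw [sqrtCountLoop]
    by_cases hdd : d * d ≤ m
    · rw [dif_pos hdd]
      by_cases hdvd : PySem.Int.mod m d = 0
      · obtain ⟨q, hq⟩ := (PySem.Int.mod_eq_zero_iff_dvd m d).mp hdvd
        have hq1 : 1 ≤ q := by nlinarith
        rw [if_pos (by simp [hdvd])]
        rw [ih (d + 1) _ (by omega) (by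
          have := sqrtCountLoop_dec m d hdd
          omega)]
        by_cases hsq : d * d = m
        · rw [if_pos hsq]
          -- remSet m d = {d}, remSet m (d+1) = ∅
          have hd2 : d * q = d * d := by rw [← hq]; exact hsq.symm
          have hqd : q = d := mul_left_cancel₀ (show (d : Int) ≠ 0 by omega) hd2
          have hone : remSet m d = {d} := by
            ext e
            rw [mem_remSet, Finset.mem_singleton]
            constructor
            · rintro ⟨⟨he1, hem⟩, hmod, hde, hprod⟩
              by_contra hne
              have : d + 1 ≤ e := by omega
              nlinarith
            · rintro rfl
              exact ⟨⟨by omega, by nlinarith⟩, hdvd, le_refl _, hdd⟩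
          have hzero : remSet m (d + 1) = ∅ := by
            ext e
            rw [mem_remSet]
            simp only [Finset.notMem_empty, iff_false]
            rintro ⟨⟨he1, hem⟩, hmod, hde, hprod⟩
            nlinarith
          rw [hone, hzero]
          simp
        · rw [if_neg hsq]
          -- remSet m d = insert d (insert q (remSet m (d+1)))
          have hlt : d * d < m := lt_of_le_of_ne hdd hsq
          have hdq : d < q := by nlinarith
          have hqm : q ≤ m := by nlinarith
          have hqN : q ∉ remSet m (d + 1) := by
            rw [mem_remSet]
            rintro ⟨_, _, _, hprod⟩
            nlinarith
          have hdN : d ∉ insert q (remSet m (d + 1)) := by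
            rw [Finset.mem_insert, mem_remSet]
            rintro (h | ⟨_, _, hde, _⟩)
            · omega
            · omega
          have hset : remSet m d = insert d (insert q (remSet m (d + 1))) := by
            ext e
            rw [mem_remSet, Finset.mem_insert, Finset.mem_insert, mem_remSet]
            constructor
            · rintro ⟨⟨he1, hem⟩, hmod, hde, hprod⟩
              by_cases hed : e = d
              · exact Or.inl hed
              · have hde1 : d + 1 ≤ e := by omega
                by_cases hp1 : (d + 1) * e ≤ m
                · exact Or.inr (Or.inr ⟨⟨he1, hem⟩, hmod, hde1, hp1⟩)
                · -- m < (d+1)e together with d*e ≤ m forces e = q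
                  obtain ⟨c, hc⟩ := (PySem.Int.mod_eq_zero_iff_dvd m e).mp hmod
                  have hcd : c = d := by nlinarith
                  have heq : e = q := by
                    have : m = d * e := by rw [hc, hcd]; ring
                    nlinarith
                  exact Or.inr (Or.inl heq)
            · rintro (rfl | rfl | ⟨⟨he1, hem⟩, hmod, hde, hprod⟩)
              · exact ⟨⟨by omega, by nlinarith⟩, hdvd, le_refl _, hdd⟩
              · refine ⟨⟨by omega, hqm⟩, ?_, by omega, by nlinarith⟩
                rw [PySem.Int.mod_eq_zero_iff_dvd]
                exact ⟨d, by rw [hq]; ring⟩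
              · exact ⟨⟨he1, hem⟩, hmod, by omega, by nlinarith⟩
          rw [hset, Finset.card_insert_of_notMem hdN,
            Finset.card_insert_of_notMem hqN]
          push_cast
          ring
      · rw [if_neg (by simp [hdvd])]
        rw [ih (d + 1) count (by omega) (by
          have := sqrtCountLoop_dec m d hdd
          omega)]
        have hset : remSet m d = remSet m (d + 1) := by
          ext e
          rw [mem_remSet, mem_remSet]
          constructor
          · rintro ⟨⟨he1, hem⟩, hmod, hde, hprod⟩
            have hne : e ≠ d := by
              rintro rfl
              exact hdvd hmod
            have hde1 : d + 1 ≤ e := by omega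
            refine ⟨⟨he1, hem⟩, hmod, hde1, ?_⟩
            by_contra hp1
            push_neg at hp1
            obtain ⟨c, hc⟩ := (PySem.Int.mod_eq_zero_iff_dvd m e).mp hmod
            have hcd : c = d := by nlinarith
            exact hdvd ((PySem.Int.mod_eq_zero_iff_dvd m d).mpr ⟨e, by rw [hc, hcd]; ring⟩)
          · rintro ⟨⟨he1, hem⟩, hmod, hde, hprod⟩
            exact ⟨⟨he1, hem⟩, hmod, by omega, by nlinarith⟩
        rw [hset]
    · rw [dif_neg hdd]
      have hemp : remSet m d = ∅ := by
        ext e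
        rw [mem_remSet]
        simp only [Finset.notMem_empty, iff_false]
        rintro ⟨⟨he1, hem⟩, _, hde, hprod⟩
        nlinarith
      rw [hemp]
      simp

theorem remSet_one (m : Int) : remSet m 1 = divSet m := by
  ext e
  rw [mem_remSet, mem_divSet]
  constructor
  · rintro ⟨hb, hmod, _, _⟩
    exact ⟨hb, hmod⟩
  · rintro ⟨⟨he1, hem⟩, hmod⟩
    exact ⟨⟨he1, hem⟩, hmod, he1, by omega⟩

-- ===== VERDICT (by name: the statement is the Claim_ definition above) =====
theorem solution_spec : Claim_equal_solution := by
  intro n _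
  unfold Spec_solution solution solution_alt
  by_cases hn : n ≤ 0
  · rw [if_pos hn, PySem.List.pyRange_one_eq_nil (by omega)]
    rfl
  · rw [if_neg hn]
    push_neg at hn
    have hn1 : 1 ≤ n := hn
    obtain ⟨hp1, hpodd, hpset⟩ := oddPartLoop_spec n.toNat n (le_refl _) hn1
    rw [solutionLoop_card n (n + 1 - 1).toNat 1 0 le_rfl le_rfl]
    rw [sqrtCountLoop_card (oddPartLoop n) hp1 (oddPartLoop n + 1 - 1).toNat 1 0 le_rfl le_rfl]
    have hall : (setA n).filter (fun e => (1 : Int) ≤ e) = setA n := by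
      apply Finset.filter_true_of_mem
      intro e he
      rw [mem_setA] at he
      omega
    rw [hall, remSet_one]
    rw [card_setA_eq_oddDivSet n hn1, hpset, oddDivSet_eq_divSet _ hpodd]
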